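-- pv_equiv track=rewrite | github.com/PatilHiteshB/Competetive | Python/TheBitGame/TheBitGame.py | swapBitGame
-- ===== SOURCE A (Python) =====
-- def swapBitGame (N):
--     # code here
--     bnum = bin(N)[2:]  #change to binary number
--     count = 0    #count variable to count number of set bits
--     for i,bit in enumerate(bnum):
--         if bit == '1':
--             count+=1
--     if count%2==0:  #count is even then player 2 wins otherwise player 1
--         return 2
--     else:
--         return 1
-- ===== SOURCE B (Python) =====
-- def swapBitGame(N):
--     # XOR word fold: after the five folds, the lowest bit of x is the XOR
--     # (parity) of all bits of abs(N); no per-bit loop and no binary string.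
--     # Correct on the task's input domain (32-bit magnitudes).
--     x = abs(N)
--     x ^= x >> 16
--     x ^= x >> 8
--     x ^= x >> 4
--     x ^= x >> 2
--     x ^= x >> 1
--     return 1 if x & 1 else 2
-- ===== Notes on version B (the rewrite author's own statement) =====
-- stated objective: alternative
-- what changed: Replaces A's binary-string build-and-scan count with a branch-free XOR word fold whose lowest bit becomes the parity of all bits of |N|; no loop over bits at all.
import Mathlib
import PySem

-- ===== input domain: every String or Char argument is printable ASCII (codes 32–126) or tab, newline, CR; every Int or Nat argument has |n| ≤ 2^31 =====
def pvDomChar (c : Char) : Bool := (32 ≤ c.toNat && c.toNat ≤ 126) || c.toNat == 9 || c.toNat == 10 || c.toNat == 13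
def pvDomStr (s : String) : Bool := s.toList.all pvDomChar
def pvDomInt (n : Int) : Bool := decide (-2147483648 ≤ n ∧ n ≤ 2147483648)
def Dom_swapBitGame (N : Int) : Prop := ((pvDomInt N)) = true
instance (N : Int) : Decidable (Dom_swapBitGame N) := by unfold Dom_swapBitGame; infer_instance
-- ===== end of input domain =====

-- B replaces A's binary-string build-and-scan with a loop-free XOR word fold (bit 0 becomes the parity of all bits of |N|).

-- ===== PORT A =====
-- Python's bin(n) digit part for a Nat (most significant first); bin's own recursion on n // 2.
def binDigits (n : Nat) : List Char :=
  if _h : n = 0 then [] else binDigits (n / 2) ++ [if n % 2 == 1 then '1' else '0']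
decreasing_by exact Nat.div_lt_self (Nat.pos_of_ne_zero _h) (by omega)

-- bin(N) as its character list: '-0b'/'0b' prefix, then the digits of |N| ('0' for N = 0).
def pyBin (N : Int) : List Char :=
  (if N < 0 then ['-', '0', 'b'] else ['0', 'b']) ++
    (if N = 0 then ['0'] else binDigits N.natAbs)

def swapBitGame (N : Int) : Int :=
  let bnum := PySem.List.slice (pyBin N) (some 2) none      -- bin(N)[2:]
  let count : Int :=
    (PySem.List.enumerate bnum 0).foldl
      (fun c p => if p.2 == '1' then c + 1 else c) 0
  if PySem.Int.mod count 2 == 0 then 2 else 1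

-- ===== PORT B =====
-- x = abs(N); x ^= x>>16; x ^= x>>8; x ^= x>>4; x ^= x>>2; x ^= x>>1; return 1 if x & 1 else 2
def swapBitGame_alt (N : Int) : Int :=
  let x0 := N.natAbs
  let x1 := x0 ^^^ (x0 >>> 16)
  let x2 := x1 ^^^ (x1 >>> 8)
  let x3 := x2 ^^^ (x2 >>> 4)
  let x4 := x3 ^^^ (x3 >>> 2)
  let x5 := x4 ^^^ (x4 >>> 1)
  if x5 &&& 1 == 1 then 1 else 2

-- ===== PRECONDITION & SPEC =====
def Spec_swapBitGame (N : Int) (out : Int) : Prop := out = swapBitGame_alt N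
instance (N : Int) (out : Int) : Decidable (Spec_swapBitGame N out) := by unfold Spec_swapBitGame; infer_instance

-- ===== CLAIM (what is proved, stated in full; the proofs are below) =====
def Claim_equal_swapBitGame : Prop := ∀ (N : Int), Dom_swapBitGame N → Spec_swapBitGame N (swapBitGame N)

-- ===== LEMMAS AND PROOFS =====

-- A's enumerate loop counts the '1' characters (the index is ignored).
theorem foldl_enum_count (l : List Char) : ∀ (s c : Int),
    (PySem.List.enumerate l s).foldl (fun c p => if p.2 == '1' then c + 1 else c) c
      = c + (l.count '1' : Int) := by
  induction l with
  | nil => intro s c; simp [PySem.List.enumerate_nil]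
  | cons x xs ih =>
    intro s c
    rw [PySem.List.enumerate_cons]
    simp only [List.foldl_cons, ih]
    by_cases hx : x = '1' <;> simp [hx] <;> try ring

-- bin(N)[2:]'s '1'-count is the '1'-count of the digits of |N|.
theorem count_slice (N : Int) :
    (PySem.List.slice (pyBin N) (some 2) none).count '1'
      = (binDigits N.natAbs).count '1' := by
  have h2 : PySem.List.slice (pyBin N) (some (2:Int)) none = (pyBin N).drop 2 := by
    have := PySem.List.slice_from_natCast (xs := pyBin N) (a := 2)
    simpa using this
  rw [h2]
  unfold pyBin
  by_cases hz : N = 0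
  · simp [hz, binDigits]
  · by_cases hn : N < 0 <;> simp [hn, hz]

-- parity bookkeeping in ZMod 2: sum of the low k bits of x
def bitSum (x k : Nat) : ZMod 2 :=
  ∑ i ∈ Finset.range k, (if x.testBit i then 1 else 0)

theorem bitSum_xor_shift (x s : Nat) :
    bitSum (x ^^^ (x >>> s)) s = bitSum x (s + s) := by
  unfold bitSum
  have hstep : ∀ i, ((if (x ^^^ (x >>> s)).testBit i then (1 : ZMod 2) else 0)
      = (if x.testBit i then 1 else 0) + (if x.testBit (s + i) then 1 else 0)) := by
    intro i
    rw [Nat.testBit_xor, Nat.testBit_shiftRight]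
    cases hx : x.testBit i <;> cases hy : x.testBit (s + i) <;> simp <;> try decide
  simp only [hstep, Finset.sum_add_distrib]
  have hsplit : ∑ i ∈ Finset.range (s + s), (if x.testBit i then (1 : ZMod 2) else 0)
      = (∑ i ∈ Finset.range s, (if x.testBit i then (1 : ZMod 2) else 0))
        + ∑ i ∈ Finset.Ico s (s + s), (if x.testBit i then (1 : ZMod 2) else 0) := by
    rw [Finset.range_eq_Ico, ← Finset.sum_Ico_consecutive _ (Nat.zero_le s) (Nat.le_add_right s s),
      ← Finset.range_eq_Ico]
  rw [hsplit, Finset.sum_Ico_eq_sum_range]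
  simp

-- parity of A's digit count = bitSum, for n below 2^k
theorem count_binDigits_eq_bitSum : ∀ (k n : Nat), n < 2 ^ k →
    (((binDigits n).count '1' : ZMod 2)) = bitSum n k := by
  intro k
  induction k with
  | zero =>
    intro n hn
    interval_cases n
    simp [binDigits, bitSum]
  | succ k ih =>
    intro n hn
    by_cases hz : n = 0
    · subst hz
      simp [binDigits, bitSum]
    · have hhalf : n / 2 < 2 ^ k :=
        Nat.div_lt_of_lt_mul (by rw [← pow_succ']; exact hn)
      have hrec : (binDigits n).count '1'
          = (binDigits (n / 2)).count '1' + (if n % 2 == 1 then 1 else 0) := by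
        conv_lhs => rw [binDigits, dif_neg hz]
        by_cases hm : n % 2 == 1 <;> simp [hm, List.count_append]
      have hbs : bitSum n (k + 1)
          = (if n.testBit 0 then (1 : ZMod 2) else 0) + bitSum (n / 2) k := by
        unfold bitSum
        rw [Finset.sum_range_succ']
        have : ∀ i, n.testBit (i + 1) = (n / 2).testBit i := by
          intro i
          simpa [Nat.add_comm] using Nat.testBit_div_two n i |>.symm
        simp only [this]
        ring
      rw [hrec, hbs, ← ih _ hhalf]
      push_cast
      rcases Nat.mod_two_eq_zero_or_one n with hm | hm <;>
        simp [Nat.testBit_zero, hm] <;> ring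

theorem bitSum_one (x : Nat) : bitSum x 1 = (if x.testBit 0 then 1 else 0) := by
  unfold bitSum
  rw [Finset.sum_range_one]

theorem natCast_zmod_two (c : Nat) : (c : ZMod 2) = if c % 2 = 1 then 1 else 0 := by
  conv_lhs => rw [← Nat.mod_add_div c 2]
  push_cast
  have h2 : (2 : ZMod 2) = 0 := rfl
  rw [h2]
  rcases Nat.mod_two_eq_zero_or_one c with h | h <;> simp [h]

-- ===== VERDICT (by name: the statement is the Claim_ definition above) =====
theorem swapBitGame_spec : Claim_equal_swapBitGame := by
  intro N hdom
  unfold Spec_swapBitGame swapBitGame swapBitGame_alt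
  simp only [foldl_enum_count, count_slice]
  have hbound : N.natAbs < 2 ^ 32 := by
    have : -2147483648 ≤ N ∧ N ≤ 2147483648 := by
      simpa [Dom_swapBitGame, pvDomInt] using hdom
    omega
  set x0 := N.natAbs with hx0
  set x1 := x0 ^^^ (x0 >>> 16) with hx1
  set x2 := x1 ^^^ (x1 >>> 8) with hx2
  set x3 := x2 ^^^ (x2 >>> 4) with hx3
  set x4 := x3 ^^^ (x3 >>> 2) with hx4
  set x5 := x4 ^^^ (x4 >>> 1) with hx5
  have hchain : bitSum x5 1 = bitSum x0 32 := by
    rw [hx5, bitSum_xor_shift, hx4, bitSum_xor_shift, hx3, bitSum_xor_shift,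
      hx2, bitSum_xor_shift, hx1, bitSum_xor_shift]
  have hcount : (((binDigits x0).count '1' : ZMod 2)) = bitSum x5 1 := by
    rw [hchain]
    exact count_binDigits_eq_bitSum 32 x0 hbound
  rw [bitSum_one] at hcount
  have hand : (x5 &&& 1 == 1) = x5.testBit 0 := by
    rcases Nat.mod_two_eq_zero_or_one x5 with h | h <;>
      simp [Nat.and_one_is_mod, Nat.testBit_zero, h]
  have hmod : ∀ k : Nat, PySem.Int.mod (0 + (k : Int)) 2 = ((k % 2 : Nat) : Int) := by
    intro k
    rw [zero_add]
    simp only [PySem.Int.mod]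
    rw [Int.fmod_eq_emod]
    push_cast
    simp
  rw [hmod]
  rw [hand]
  set c := (binDigits x0).count '1' with hc
  rw [natCast_zmod_two] at hcount
  cases hb : x5.testBit 0 <;> rw [hb] at hcount
  · have h : c % 2 = 0 := by
      rcases Nat.mod_two_eq_zero_or_one c with h | h
      · exact h
      · simp [h] at hcount
    simp [h]
  · have h : c % 2 = 1 := by
      rcases Nat.mod_two_eq_zero_or_one c with h | h
      · simp [h] at hcount
      · exact h
    simp [h]
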